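-- pv_equiv track=rewrite | github.com/akaihola/palindromi.fi | palindromi_fi_builder/adhoc/zoho_notebook.py | split_by_empty_lines
-- ===== SOURCE A (Python) =====
-- from collections.abc import Iterable
-- from itertools import chain
--
-- def split_by_empty_lines(content_stream: Iterable[str]) -> Iterable[list[str]]:
--     """Split a stream of text into blocks separated by empty lines
--
--     :param content_stream: The stream of text
--     :yield: The blocks of text
--
--     """
--     current_block: list[str] = []
--     for line in chain("".join(content_stream).splitlines(), [""]):
--         if line.strip():
--             current_block.append(line)
--         elif current_block:
--             yield current_block
--             current_block = []
-- ===== SOURCE B (Python) =====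
-- from collections.abc import Iterable
-- from itertools import groupby
--
--
-- def split_by_empty_lines(content_stream: Iterable[str]) -> Iterable[list[str]]:
--     """Split a stream of text into blocks separated by blank lines."""
--     lines = "".join(content_stream).splitlines()
--     for nonblank, group in groupby(lines, key=lambda line: bool(line.strip())):
--         if nonblank:
--             yield list(group)
-- ===== Notes on version B (the rewrite author's own statement) =====
-- stated objective: simpler
-- what changed: Replaced the manual current_block accumulator with its sentinel '' append and reset logic by itertools.groupby over the lines keyed on bool(line.strip()), yielding each True-keyed group.
import Mathlib
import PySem

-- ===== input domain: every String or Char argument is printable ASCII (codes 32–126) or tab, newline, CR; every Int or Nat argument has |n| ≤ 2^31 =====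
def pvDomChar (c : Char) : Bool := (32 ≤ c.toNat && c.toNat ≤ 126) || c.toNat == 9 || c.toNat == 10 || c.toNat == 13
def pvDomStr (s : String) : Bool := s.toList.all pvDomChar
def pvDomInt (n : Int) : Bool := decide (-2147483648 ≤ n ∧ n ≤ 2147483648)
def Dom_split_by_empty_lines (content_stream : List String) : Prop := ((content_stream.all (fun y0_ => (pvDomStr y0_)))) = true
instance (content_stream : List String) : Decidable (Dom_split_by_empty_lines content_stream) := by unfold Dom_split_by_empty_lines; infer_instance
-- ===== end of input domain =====

-- B replaces A's manual current_block accumulator (with its sentinel "" flush) by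
-- itertools.groupby over the lines keyed on blankness, yielding the nonblank groups: simpler decomposition.


-- ===== PORT A =====
-- for line in chain("".join(content_stream).splitlines(), [""]): accumulate into current_block,
-- flush it to the output on a blank line (the trailing "" flushes the last block)
def split_by_empty_lines (content_stream : List String) : List (List String) :=
  (((PySem.Str.splitlines (PySem.Str.join "" content_stream)) ++ [""]).foldl
    (fun (st : List (List String) × List String) (line : String) =>
      if PySem.Str.strip line != "" then (st.1, st.2 ++ [line])
      else if st.2 ≠ [] then (st.1 ++ [st.2], [])
      else st)
    ([], [])).1

-- ===== PORT B =====
-- itertools.groupby: consecutive runs of lines with equal key, in order, as (key, list(group)) pairs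
def pyGroupByKey (key : String → Bool) : List String → List (Bool × List String)
  | [] => []
  | l :: ls =>
      (key l, l :: ls.takeWhile (fun x => key x == key l)) ::
        pyGroupByKey key (ls.dropWhile (fun x => key x == key l))
termination_by ls => ls.length
decreasing_by
  exact Nat.lt_succ_of_le (List.length_dropWhile_le _ _)

-- for nonblank, group in groupby(lines, key=λ line. bool(line.strip())): if nonblank: yield list(group)
def split_by_empty_lines_alt (content_stream : List String) : List (List String) :=
  (pyGroupByKey (fun line => PySem.Str.strip line != "")
      (PySem.Str.splitlines (PySem.Str.join "" content_stream))).filterMap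
    (fun g => if g.1 then some g.2 else none)

-- ===== PRECONDITION & SPEC =====
def Spec_split_by_empty_lines (content_stream : List String) (out : List (List String)) : Prop := out = split_by_empty_lines_alt content_stream
instance (content_stream : List String) (out : List (List String)) : Decidable (Spec_split_by_empty_lines content_stream out) := by unfold Spec_split_by_empty_lines; infer_instance

-- ===== CLAIM (what is proved, stated in full; the proofs are below) =====
def Claim_equal_split_by_empty_lines : Prop := ∀ (content_stream : List String), Dom_split_by_empty_lines content_stream → Spec_split_by_empty_lines content_stream (split_by_empty_lines content_stream)

-- ===== LEMMAS AND PROOFS =====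

-- A's loop, phrased recursively over the lines (the trailing "" flush folded into the base case)
def runA (p : String → Bool) : List String → List String → List (List String)
  | cur, [] => if cur ≠ [] then [cur] else []
  | cur, l :: ls =>
      if p l then runA p (cur ++ [l]) ls
      else if cur ≠ [] then cur :: runA p [] ls
      else runA p [] ls

theorem foldl_eq_runA (p : String → Bool) (hp : p "" = false) :
    ∀ (xs : List String) (acc : List (List String)) (cur : List String),
      ((xs ++ [""]).foldl
        (fun (st : List (List String) × List String) (line : String) =>
          if p line then (st.1, st.2 ++ [line])
          else if st.2 ≠ [] then (st.1 ++ [st.2], [])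
          else st)
        (acc, cur)).1 = acc ++ runA p cur xs
  | [], acc, cur => by
      by_cases h : cur = []
      · simp [runA, hp, h]
      · simp [runA, hp, h]
  | l :: ls, acc, cur => by
      by_cases h : p l
      · simpa [runA, h] using foldl_eq_runA p hp ls acc (cur ++ [l])
      · by_cases hc : cur = []
        · simpa [runA, h, hc] using foldl_eq_runA p hp ls acc []
        · simpa [runA, h, hc] using foldl_eq_runA p hp ls (acc ++ [cur]) []

-- inside a nonempty block, A keeps appending while p holds, then flushes
theorem runA_group (p : String → Bool) :
    ∀ (ls cur : List String), cur ≠ [] →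
      runA p cur ls = (cur ++ ls.takeWhile p) :: runA p [] (ls.dropWhile p)
  | [], cur, hc => by simp [runA, hc]
  | l :: ls, cur, hc => by
      by_cases h : p l
      · have := runA_group p ls (cur ++ [l]) (by simp)
        simp [runA, h, this]
      · simp [runA, h, hc, List.dropWhile_cons]

-- a leading run of blank lines contributes no group
theorem filterMap_groupBy_dropFalse (p : String → Bool) (ls : List String) :
    (pyGroupByKey p (ls.dropWhile (fun x => !p x))).filterMap
        (fun g => if g.1 then some g.2 else none) =
      (pyGroupByKey p ls).filterMap (fun g => if g.1 then some g.2 else none) := by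
  cases ls with
  | nil => rfl
  | cons m ms =>
      by_cases h : p m
      · simp [List.dropWhile_cons, h]
      · rw [pyGroupByKey]
        simp [List.dropWhile_cons, h]

theorem runA_eq_groupBy (p : String → Bool) :
    ∀ ls : List String,
      runA p [] ls =
        (pyGroupByKey p ls).filterMap (fun g => if g.1 then some g.2 else none)
  | [] => by simp [runA, pyGroupByKey]
  | l :: ls => by
      by_cases h : p l
      · have hrec := runA_eq_groupBy p (ls.dropWhile p)
        rw [pyGroupByKey]
        have hgrp := runA_group p ls [l] (by simp)
        simp [runA, h, hgrp, hrec]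
      · have hrec := runA_eq_groupBy p ls
        have hdrop := filterMap_groupBy_dropFalse p ls
        rw [pyGroupByKey]
        simp only [runA, h, ite_false, Bool.false_eq_true]
        simp only [Bool.false_eq_true, ite_false, ne_eq, not_true_eq_false,
          List.filterMap_cons]
        rw [hrec, ← hdrop]
        simp
  termination_by ls => ls.length
  decreasing_by
    · exact Nat.lt_succ_of_le (List.length_dropWhile_le _ _)
    · simp

-- ===== VERDICT (by name: the statement is the Claim_ definition above) =====
theorem split_by_empty_lines_spec : Claim_equal_split_by_empty_lines := by
  intro content_stream _
  unfold Spec_split_by_empty_lines split_by_empty_lines split_by_empty_lines_alt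
  rw [foldl_eq_runA (fun line => PySem.Str.strip line != "") (by decide)]
  rw [runA_eq_groupBy]
  rfl
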